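-- pv_equiv track=rewrite | github.com/gusqls0525/FM_minigame | 토트넘과 다른팀의 상대골수.py | now_position
-- ===== SOURCE A (Python) =====
-- def now_position(scores):
--     position_points = [79, 78, 65, 63, 59, 55, 54, 54, 50, 45, 40, 39, 37, 34, 30, 30, 30, 29, 24]
--     index = 0
--     for position in position_points:
--         index += 1
--         if scores >= position:
--             break
--     return index
-- ===== SOURCE B (Python) =====
-- def now_position(scores):
--     position_points = [79, 78, 65, 63, 59, 55, 54, 54, 50, 45, 40, 39, 37, 34, 30, 30, 30, 29, 24]
--     count = sum(1 for p in position_points if scores < p)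
--     return min(count + 1, len(position_points))
-- ===== Notes on version B (the rewrite author's own statement) =====
-- stated objective: simpler
-- what changed: B replaces A's break-on-first-match loop with a count of thresholds strictly above the score, clamped to the number of brackets; no early exit or mutable index is needed.
import Mathlib
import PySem

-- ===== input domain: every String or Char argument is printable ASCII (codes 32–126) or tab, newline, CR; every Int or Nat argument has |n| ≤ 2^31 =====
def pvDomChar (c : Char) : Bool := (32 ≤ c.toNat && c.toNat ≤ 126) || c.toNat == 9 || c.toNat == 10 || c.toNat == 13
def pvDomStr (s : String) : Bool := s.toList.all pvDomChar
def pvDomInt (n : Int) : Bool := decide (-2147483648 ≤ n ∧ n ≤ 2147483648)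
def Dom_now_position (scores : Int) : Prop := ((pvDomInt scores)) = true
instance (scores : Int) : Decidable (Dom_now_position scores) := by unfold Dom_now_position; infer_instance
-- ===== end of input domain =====

-- B counts the thresholds strictly above the score and clamps to the bracket count; A scans for the first threshold reached (simpler: no break, no mutable index).

-- ===== PORT A =====
-- the for-loop with break, transliterated as structural recursion over the list carrying the running index
def nowPosLoop (scores : Int) : List Int → Int → Int
  | [], index => index
  | p :: rest, index =>
    let index := index + 1
    if scores ≥ p then index else nowPosLoop scores rest index

def now_position (scores : Int) : Int :=
  let position_points : List Int := [79, 78, 65, 63, 59, 55, 54, 54, 50, 45, 40, 39, 37, 34, 30, 30, 30, 29, 24]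
  nowPosLoop scores position_points 0

-- ===== PORT B =====
def now_position_alt (scores : Int) : Int :=
  let position_points : List Int := [79, 78, 65, 63, 59, 55, 54, 54, 50, 45, 40, 39, 37, 34, 30, 30, 30, 29, 24]
  let count : Int := (position_points.countP (fun p => decide (scores < p)) : Nat)
  min (count + 1) (position_points.length : Int)

-- ===== PRECONDITION & SPEC =====
def Spec_now_position (scores : Int) (out : Int) : Prop := out = now_position_alt scores
instance (scores : Int) (out : Int) : Decidable (Spec_now_position scores out) := by unfold Spec_now_position; infer_instance

-- ===== CLAIM (what is proved, stated in full; the proofs are below) =====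
def Claim_equal_now_position : Prop := ∀ (scores : Int), Dom_now_position scores → Spec_now_position scores (now_position scores)

-- ===== LEMMAS AND PROOFS =====

-- On a descending list, A's first-hit loop equals B's clamped count.
theorem nowPosLoop_eq_count (s : Int) :
    ∀ (l : List Int), l.Pairwise (· ≥ ·) → ∀ (i : Int),
      nowPosLoop s l i = i + min (((l.countP (fun p => decide (s < p)) : Nat) : Int) + 1) (l.length : Int) := by
  intro l hl
  induction l with
  | nil => intro i; simp [nowPosLoop]
  | cons p rest ih =>
    intro i
    rcases List.pairwise_cons.mp hl with ⟨hp, hrest⟩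
    by_cases h : s ≥ p
    · have hcount : rest.countP (fun q => decide (s < q)) = 0 := by
        rw [List.countP_eq_zero]
        intro q hq
        simp only [decide_eq_true_eq]
        exact not_lt.mpr (le_trans (hp q hq) h)
      simp [nowPosLoop, h, hcount, not_lt.mpr h]
    · have hsp : s < p := lt_of_not_ge h
      simp only [nowPosLoop, h, if_false, List.countP_cons, List.length_cons,
        decide_eq_true_eq, hsp, if_pos, ih hrest]
      push_cast
      omega

-- ===== VERDICT (by name: the statement is the Claim_ definition above) =====
theorem now_position_spec : Claim_equal_now_position := by
  intro s _
  show now_position s = now_position_alt s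
  unfold now_position now_position_alt
  rw [nowPosLoop_eq_count s _ (by decide)]
  simp
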